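-- pv_equiv track=rewrite | github.com/Vinvladi/python3 | Book and Lecture Good/Youtube Egorov Artem @egoroffchannel/ego 19 + def.py | digit_10_to_2
-- ===== SOURCE A (Python) =====
-- def digit_10_to_2(x):
--     digit_to_2 = []
--     while x > 0:
--         last = x % 10
--         digit_to_2.append(last)
--         x = x // 10
--     digit_to_2.reverse()
--     return digit_to_2
-- ===== SOURCE B (Python) =====
-- def digit_10_to_2(x):
--     if x <= 0:
--         return []
--     return [int(c) for c in str(x)]
-- ===== Notes on version B (the rewrite author's own statement) =====
-- stated objective: idiomatic
-- what changed: Replaces the modulo/floor-division accumulation loop plus final reverse with a single string conversion: str(x) already yields the decimal digits most-significant-first, so B just maps int over its characters (guarded by x <= 0 -> [], matching A's empty result for zero and negatives).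
import Mathlib
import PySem

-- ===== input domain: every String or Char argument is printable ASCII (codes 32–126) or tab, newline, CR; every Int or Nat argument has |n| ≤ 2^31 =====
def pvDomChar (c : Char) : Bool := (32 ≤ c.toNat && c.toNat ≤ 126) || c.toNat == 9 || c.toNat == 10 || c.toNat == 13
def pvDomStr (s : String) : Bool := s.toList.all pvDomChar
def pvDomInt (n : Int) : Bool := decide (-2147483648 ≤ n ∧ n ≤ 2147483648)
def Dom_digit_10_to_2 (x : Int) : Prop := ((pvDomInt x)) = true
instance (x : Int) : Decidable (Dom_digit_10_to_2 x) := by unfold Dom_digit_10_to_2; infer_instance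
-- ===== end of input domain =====

-- B replaces A's modulo/floor-division loop + reverse with mapping int over the characters of str(x) (guard x ≤ 0 → []); objective: idiomatic.


-- ===== PORT A =====
-- the 'while x > 0' loop: append x % 10, then x = x // 10
def digitLoopA (x : Int) (acc : List Int) : List Int :=
  if x > 0 then
    digitLoopA (PySem.Int.floordiv x 10) (acc ++ [PySem.Int.mod x 10])
  else acc
termination_by x.toNat
decreasing_by
  have h10 : (0:Int) < 10 := by norm_num
  have := PySem.Int.floordiv_eq_ediv_of_pos (a := x) (b := 10) h10
  rw [this]; omega

def digit_10_to_2 (x : Int) : List Int :=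
  (digitLoopA x []).reverse

-- ===== PORT B =====
-- int(c) for the single decimal-digit characters str(x) produces is exactly code(c) - 48
def pyDigitVal (c : Char) : Int := (c.toNat : Int) - 48

def digit_10_to_2_alt (x : Int) : List Int :=
  if x ≤ 0 then []
  else (PySem.Int.toChars x).map pyDigitVal

-- ===== PRECONDITION & SPEC =====
def Spec_digit_10_to_2 (x : Int) (out : List Int) : Prop := out = digit_10_to_2_alt x
instance (x : Int) (out : List Int) : Decidable (Spec_digit_10_to_2 x out) := by unfold Spec_digit_10_to_2; infer_instance

-- ===== CLAIM (what is proved, stated in full; the proofs are below) =====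
def Claim_equal_digit_10_to_2 : Prop := ∀ (x : Int), Dom_digit_10_to_2 x → Spec_digit_10_to_2 x (digit_10_to_2 x)

-- ===== LEMMAS AND PROOFS =====

lemma pyDigitVal_digitChar (d : Nat) (h : d < 10) :
    pyDigitVal (Nat.digitChar d) = (d : Int) := by
  interval_cases d <;> decide

lemma digitLoopA_spec (n : Nat) (hn : 0 < n) (acc : List Int) :
    digitLoopA (n : Int) acc = acc ++ ((Nat.toDigits 10 n).map pyDigitVal).reverse := by
  induction n using Nat.strong_induction_on generalizing acc with
  | _ n ih =>
    rw [digitLoopA]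
    have hpos : ((n : Int)) > 0 := by exact_mod_cast hn
    rw [if_pos hpos]
    have hdiv : PySem.Int.floordiv (n : Int) 10 = ((n / 10 : Nat) : Int) := by
      exact_mod_cast PySem.Int.floordiv_natCast n 10
    have hmod : PySem.Int.mod (n : Int) 10 = ((n % 10 : Nat) : Int) := by
      exact_mod_cast PySem.Int.mod_natCast n 10
    rw [hdiv, hmod]
    by_cases hlt : n < 10
    · have hq : n / 10 = 0 := Nat.div_eq_of_lt hlt
      rw [hq]
      rw [digitLoopA, if_neg (by norm_num)]
      rw [Nat.toDigits_of_lt_base hlt]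
      have hm : n % 10 = n := Nat.mod_eq_of_lt hlt
      simp [hm, pyDigitVal_digitChar n hlt]
    · have hge : 10 ≤ n := Nat.le_of_not_lt hlt
      have hq : 0 < n / 10 := Nat.div_pos hge (by norm_num)
      have hlt' : n / 10 < n := Nat.div_lt_self hn (by norm_num)
      rw [ih (n / 10) hlt' hq]
      rw [Nat.toDigits_of_base_le (by norm_num) hge]
      simp [pyDigitVal_digitChar (n % 10) (Nat.mod_lt n (by norm_num))]

-- ===== VERDICT (by name: the statement is the Claim_ definition above) =====
theorem digit_10_to_2_spec : Claim_equal_digit_10_to_2 := by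
  intro x _
  unfold Spec_digit_10_to_2 digit_10_to_2 digit_10_to_2_alt
  by_cases hx : x ≤ 0
  · rw [if_pos hx]
    rw [digitLoopA, if_neg (by omega)]
    simp
  · rw [if_neg hx]
    have hx' : 0 < x := by omega
    have hxn : x = ((x.toNat : Nat) : Int) := by omega
    have hn : 0 < x.toNat := by omega
    rw [hxn, digitLoopA_spec x.toNat hn []]
    simp [PySem.Int.toChars]
    congr 2
    omega
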